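-- pv_equiv track=rewrite | github.com/ulel/advent_of_code | 2018/02/aoc_02.py | have_two_or_three_same
-- ===== SOURCE A (Python) =====
-- import collections
--
-- def have_two_or_three_same(box_id):
--     """
--     Return a tuple with first field being a 1 if box_id counts at least one
--     pair and second field being the same for triplet.
--     """
--     result = (0, 0)
--
--     for (_, count) in collections.Counter(box_id).items():
--         if count == 2:
--             result = (1, result[1])
--         if count == 3:
--             result = (result[0], 1)
--
--     return result
-- ===== SOURCE B (Python) =====
-- def have_two_or_three_same(box_id):
--     """
--     Return a tuple with first field being a 1 if box_id counts at least one
--     pair and second field being the same for triplet.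
--     """
--     s = sorted(box_id)
--     saw2 = saw3 = False
--     i = 0
--     n = len(s)
--     while i < n:
--         j = i
--         while j < n and s[j] == s[i]:
--             j += 1
--         run = j - i
--         if run == 2:
--             saw2 = True
--         if run == 3:
--             saw3 = True
--         i = j
--     return (1 if saw2 else 0, 1 if saw3 else 0)
-- ===== Notes on version B (the rewrite author's own statement) =====
-- stated objective: alternative
-- what changed: Replaces the collections.Counter hash table with sort-then-scan: sort the characters and measure each run of equal consecutive characters, setting two boolean flags when a run has length 2 or 3.
import Mathlib
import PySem

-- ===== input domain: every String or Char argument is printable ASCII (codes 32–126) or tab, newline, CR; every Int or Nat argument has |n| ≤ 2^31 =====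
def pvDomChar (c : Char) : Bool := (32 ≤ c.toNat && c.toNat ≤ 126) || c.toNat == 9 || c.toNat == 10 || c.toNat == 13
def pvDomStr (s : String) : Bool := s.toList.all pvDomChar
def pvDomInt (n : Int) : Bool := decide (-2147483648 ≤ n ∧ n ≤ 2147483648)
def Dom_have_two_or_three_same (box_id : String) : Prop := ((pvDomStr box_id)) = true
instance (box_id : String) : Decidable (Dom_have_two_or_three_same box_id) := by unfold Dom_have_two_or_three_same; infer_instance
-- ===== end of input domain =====

-- B replaces A's Counter hash table with sort-then-scan over runs of equal characters (alternative, same result).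

-- ===== PORT A =====
-- loop body of A's 'for (_, count) in Counter(box_id).items()'
def stepA (result : Int × Int) (item : Char × Int) : Int × Int :=
  let result := if item.2 == 2 then ((1 : Int), result.2) else result
  if item.2 == 3 then (result.1, (1 : Int)) else result

def have_two_or_three_same (box_id : String) : Int × Int :=
  (PySem.Dict.counter box_id.toList).items.foldl stepA (0, 0)

-- ===== PORT B =====
-- the outer while loop of Source B; the inner 'while j < n and s[j] == s[i]: j += 1'
-- is the takeWhile/dropWhile split of the remaining list at the current run
def scanRunsB : List Char → Bool → Bool → Bool × Bool
  | [], saw2, saw3 => (saw2, saw3)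
  | c :: rest, saw2, saw3 =>
    let run : Nat := 1 + (rest.takeWhile (fun d => d == c)).length
    scanRunsB (rest.dropWhile (fun d => d == c)) (saw2 || run == 2) (saw3 || run == 3)
termination_by l _ _ => l.length
decreasing_by
  have := (List.dropWhile_sublist (l := rest) (fun d => d == c)).length_le
  simp; omega

def have_two_or_three_same_alt (box_id : String) : Int × Int :=
  let s := PySem.List.sorted box_id.toList (fun c => c) false
  let r := scanRunsB s false false
  (if r.1 then 1 else 0, if r.2 then 1 else 0)

-- ===== PRECONDITION & SPEC =====
def Spec_have_two_or_three_same (box_id : String) (out : Int × Int) : Prop := out = have_two_or_three_same_alt box_id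
instance (box_id : String) (out : Int × Int) : Decidable (Spec_have_two_or_three_same box_id out) := by unfold Spec_have_two_or_three_same; infer_instance

-- ===== CLAIM (what is proved, stated in full; the proofs are below) =====
def Claim_equal_have_two_or_three_same : Prop := ∀ (box_id : String), Dom_have_two_or_three_same box_id → Spec_have_two_or_three_same box_id (have_two_or_three_same box_id)

-- ===== LEMMAS AND PROOFS =====

-- A's loop sets each component to 1 exactly when some item has count 2 (resp. 3)
theorem foldA_char (l : List (Char × Int)) (r : Int × Int) :
    l.foldl stepA r =
      (if l.any (fun it => it.2 == 2) then 1 else r.1,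
       if l.any (fun it => it.2 == 3) then 1 else r.2) := by
  induction l generalizing r with
  | nil => simp
  | cons x t ih =>
    simp only [List.foldl_cons, List.any_cons, ih, stepA]
    by_cases h2 : x.2 = 2 <;> by_cases h3 : x.2 = 3 <;> simp [h2, h3]

-- B's run scan on a (≤)-sorted list sees a run of length 2 (resp. 3)
-- iff some element has count 2 (resp. 3)
theorem scanRunsB_char (n : Nat) : ∀ (l : List Char), l.length ≤ n → l.Pairwise (· ≤ ·) →
    ∀ s2 s3 : Bool, scanRunsB l s2 s3 =
      (s2 || l.any (fun c => l.count c == 2), s3 || l.any (fun c => l.count c == 3)) := by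
  induction n with
  | zero =>
    intro l hl _ s2 s3
    have : l = [] := List.length_eq_zero_iff.mp (Nat.le_zero.mp hl)
    subst this; simp [scanRunsB]
  | succ n ih =>
    intro l hl hs s2 s3
    cases l with
    | nil => simp [scanRunsB]
    | cons c rest =>
      have hsplit : rest.takeWhile (fun e => e == c) ++ rest.dropWhile (fun e => e == c) = rest :=
        List.takeWhile_append_dropWhile
      set t := rest.takeWhile (fun e => e == c) with ht
      set d := rest.dropWhile (fun e => e == c) with hd
      set run : Nat := 1 + t.length with hrun
      have hrest : rest.Pairwise (· ≤ ·) := (List.pairwise_cons.mp hs).2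
      have hle : ∀ x ∈ rest, c ≤ x := (List.pairwise_cons.mp hs).1
      have hdsub : d.Sublist rest := hd ▸ List.dropWhile_sublist _
      have hdPair : d.Pairwise (· ≤ ·) := hrest.sublist hdsub
      have htc : ∀ x ∈ t, x = c := by
        intro x hx
        have := List.mem_takeWhile_imp (ht ▸ hx)
        simpa using this
      -- every element of d exceeds c strictly
      have hdgt : ∀ x ∈ d, c < x := by
        cases hD : d with
        | nil => simp
        | cons h tl =>
          have hne : rest.dropWhile (fun e => e == c) ≠ [] := by
            rw [← hd, hD]; simp
          have hhead : (fun e => e == c) ((rest.dropWhile (fun e => e == c)).head hne) = false :=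
            List.head_dropWhile_not _ hne
          have hh : (rest.dropWhile (fun e => e == c)).head hne = h := by
            have : rest.dropWhile (fun e => e == c) = h :: tl := by rw [← hd, hD]
            simp [this]
          have hhne : h ≠ c := by rw [hh] at hhead; simpa using hhead
          have hhr : h ∈ rest := hdsub.mem (hD ▸ List.mem_cons_self)
          have hch : c < h := lt_of_le_of_ne (hle h hhr) (Ne.symm hhne)
          intro x hx
          rcases List.mem_cons.mp hx with rfl | hx'
          · exact hch
          · have hp : (h :: tl).Pairwise (· ≤ ·) := hD ▸ hdPair
            exact lt_of_lt_of_le hch ((List.pairwise_cons.mp hp).1 x hx')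
      have hdc : d.count c = 0 := List.count_eq_zero.mpr (fun hc => lt_irrefl c (hdgt c hc))
      have htcount : t.count c = t.length := List.count_eq_length.mpr (fun b hb => (htc b hb).symm)
      have hcountc : (c :: rest).count c = run := by
        have h1 : (c :: rest).count c = t.count c + d.count c + 1 := by
          rw [← hsplit]; simp [List.count_append]
        rw [htcount, hdc] at h1; omega
      have hcounty : ∀ y ∈ d, (c :: rest).count y = d.count y := by
        intro y hy
        have hyc : y ≠ c := fun h => lt_irrefl c (h ▸ hdgt y hy)
        have hty : t.count y = 0 := List.count_eq_zero.mpr (fun hyt => hyc (htc y hyt))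
        rw [← hsplit]
        simp [List.count_append, hty, Ne.symm hyc]
      -- the any-condition over the whole list decomposes into run length vs the tail scan
      have hk : ∀ k : Nat, ((run == k) || d.any (fun y => d.count y == k))
                  = (c :: rest).any (fun x => (c :: rest).count x == k) := by
        intro k
        rw [Bool.eq_iff_iff]
        simp only [Bool.or_eq_true, List.any_eq_true, beq_iff_eq]
        constructor
        · rintro (hrk | ⟨y, hy, hpy⟩)
          · exact ⟨c, List.mem_cons_self, by rw [hcountc]; exact hrk⟩
          · exact ⟨y, List.mem_cons.mpr (Or.inr (hdsub.mem hy)),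
              by rw [hcounty y hy]; exact hpy⟩
        · rintro ⟨x, hx, hpx⟩
          rcases List.mem_cons.mp hx with rfl | hx'
          · left; rw [hcountc] at hpx; exact hpx
          · rw [← hsplit] at hx'
            rcases List.mem_append.mp hx' with hxt | hxd
            · left; rw [htc x hxt, hcountc] at hpx; exact hpx
            · right; exact ⟨x, hxd, by rw [← hcounty x hxd]; exact hpx⟩
      have hdlen : d.length ≤ n := by
        have := hdsub.length_le
        simp at hl; omega
      rw [scanRunsB]
      simp only [← ht, ← hd, ← hrun]
      rw [ih d hdlen hdPair]
      rw [← hk 2, ← hk 3]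
      simp [Bool.or_assoc]

-- the two any-conditions agree across the sorting permutation and the Counter's distinct-key list
theorem any_count_perm (cs : List Char) (ki : Int) (k : Nat) (hik : ki = (k : Int)) :
    (PySem.Set.ofList cs).any (fun x => ((cs.count x : Int) == ki))
      = (PySem.List.sorted cs (fun c => c) false).any
          (fun x => (PySem.List.sorted cs (fun c => c) false).count x == k) := by
  subst hik
  set s := PySem.List.sorted cs (fun c => c) false with hsdef
  have hperm : s.Perm cs := PySem.List.sorted_perm cs (fun c => c) false
  rw [Bool.eq_iff_iff]
  simp only [List.any_eq_true, beq_iff_eq, PySem.Set.mem_ofList]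
  constructor
  · rintro ⟨x, hx, hpx⟩
    refine ⟨x, hperm.mem_iff.mpr hx, ?_⟩
    rw [hperm.count_eq]
    exact_mod_cast hpx
  · rintro ⟨x, hx, hpx⟩
    refine ⟨x, hperm.mem_iff.mp hx, ?_⟩
    rw [hperm.count_eq] at hpx
    exact_mod_cast hpx

-- ===== VERDICT (by name: the statement is the Claim_ definition above) =====
theorem have_two_or_three_same_spec : Claim_equal_have_two_or_three_same := by
  intro box_id _
  unfold Spec_have_two_or_three_same have_two_or_three_same have_two_or_three_same_alt
  set cs := box_id.toList with hcs
  set s := PySem.List.sorted cs (fun c => c) false with hsdef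
  have hsorted : s.Pairwise (· ≤ ·) := by
    have := PySem.List.sorted_pairwise cs (fun c : Char => c)
    simpa [hsdef] using this
  have halt : (have s := s; have r := scanRunsB s false false;
      ((if r.1 then 1 else 0 : Int), (if r.2 then 1 else 0 : Int)))
      = ((if (scanRunsB s false false).1 then 1 else 0 : Int),
         (if (scanRunsB s false false).2 then 1 else 0 : Int)) := rfl
  rw [PySem.Dict.items_counter, foldA_char, halt, scanRunsB_char s.length s le_rfl hsorted]
  simp only [List.any_map, Function.comp_def, Bool.false_or]
  rw [any_count_perm cs 2 2 (by norm_num), any_count_perm cs 3 3 (by norm_num)]
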